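-- pv_equiv track=rewrite | github.com/XxX-42/Dailynotes | AntigravitySync/src/dailynotes/sync/rendering.py | cleanup_empty_headers
-- ===== SOURCE A (Python) =====
-- def ensure_structure(lines):
--     has_dp = any(l.strip() == "# Day planner" for l in lines)
--     j_idx = -1
--     try:
--         j_idx = next(i for i, l in enumerate(lines) if l.strip() == "# Journey")
--     except StopIteration:
--         pass
--     if not has_dp:
--         if j_idx != -1:
--             lines.insert(j_idx, "# Day planner\n\n")
--         else:
--             lines.insert(0, "# Day planner\n\n");
--             lines.append("\n# Journey\n")
--     if has_dp and j_idx == -1: lines.append("\n# Journey\n")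
--     return lines
--
-- def cleanup_empty_headers(lines, date_tag):
--     lines = ensure_structure(lines)
--     cleaned_lines = []
--     i = 0
--     modified = False
--     current_section = None
--     target_sections = ['# Day planner', '# Journey']
--     while i < len(lines):
--         line = lines[i]
--         s_line = line.strip()
--         if s_line.startswith('# '):
--             current_section = s_line;
--             cleaned_lines.append(line);
--             i += 1;
--             continue
--         if current_section not in target_sections:
--             cleaned_lines.append(line);
--             i += 1;
--             continue
--         if s_line.startswith('## '):
--             has_content = False
--             j = i + 1
--             while j < len(lines):
--                 next_s = lines[j].strip()
--                 if next_s.startswith('# ') or next_s.startswith('## ') or next_s == '----------': break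
--                 if next_s: has_content = True; break
--                 j += 1
--             if not has_content:
--                 modified = True;
--                 i = j
--             else:
--                 cleaned_lines.append(line);
--                 i += 1
--         else:
--             cleaned_lines.append(line);
--             i += 1
--     return cleaned_lines, modified
-- ===== SOURCE B (Python) =====
-- def cleanup_empty_headers(lines, date_tag):
--     # structure guarantee (non-mutating version of A's ensure_structure)
--     if not any(l.strip() == "# Day planner" for l in lines):
--         j = next((i for i, l in enumerate(lines) if l.strip() == "# Journey"), None)
--         if j is None:
--             lines = ["# Day planner\n\n"] + lines + ["\n# Journey\n"]
--         else:
--             lines = lines[:j] + ["# Day planner\n\n"] + lines[j:]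
--     elif all(l.strip() != "# Journey" for l in lines):
--         lines = lines + ["\n# Journey\n"]
--
--     target_sections = ('# Day planner', '# Journey')
--     out = []
--     modified = False
--     current_section = None
--     pending = None      # a '## ' header not yet emitted
--     blanks = []         # blank lines buffered after the pending header
--     for line in lines:
--         s = line.strip()
--         if s.startswith('# '):
--             if pending is not None:
--                 pending = None; blanks = []; modified = True
--             current_section = s
--             out.append(line)
--         elif current_section not in target_sections:
--             out.append(line)
--         elif s.startswith('## '):
--             if pending is not None:
--                 modified = True
--             pending = line
--             blanks = []
--         elif s == '----------':
--             if pending is not None: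
--                 pending = None; blanks = []; modified = True
--             out.append(line)
--         elif not s:
--             if pending is not None:
--                 blanks.append(line)
--             else:
--                 out.append(line)
--         else:
--             if pending is not None:
--                 out.append(pending)
--                 out.extend(blanks)
--                 pending = None; blanks = []
--             out.append(line)
--     if pending is not None:
--         modified = True
--     return out, modified
-- ===== Notes on version B (the rewrite author's own statement) =====
-- stated objective: simpler
-- what changed: Replaces A's lookahead inner while-loop (re-scanning forward from each '## ' header, with index jumps) by a single flat pass that defers header emission via a pending-header slot and a buffered-blanks list, flushed or discarded at the next content/boundary line; the structure-ensuring step is rewritten non-mutating with slicing.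
import Mathlib
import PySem

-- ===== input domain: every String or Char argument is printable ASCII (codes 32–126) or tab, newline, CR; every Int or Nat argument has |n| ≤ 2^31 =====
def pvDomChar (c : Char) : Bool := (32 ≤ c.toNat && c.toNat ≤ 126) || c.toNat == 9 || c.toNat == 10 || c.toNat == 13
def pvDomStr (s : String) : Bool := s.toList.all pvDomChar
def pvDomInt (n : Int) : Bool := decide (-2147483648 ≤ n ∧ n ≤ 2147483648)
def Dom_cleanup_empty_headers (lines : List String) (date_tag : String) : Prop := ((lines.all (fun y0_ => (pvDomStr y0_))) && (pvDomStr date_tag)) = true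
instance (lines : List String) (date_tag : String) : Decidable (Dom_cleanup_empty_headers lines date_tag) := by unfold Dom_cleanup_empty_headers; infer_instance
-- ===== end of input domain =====

-- B replaces A's per-header forward lookahead loop by one flat pass with a deferred
-- pending-header slot and buffered blanks (objective: simpler, one pass).
-- NOTE: Python A mutates its `lines` argument in place (ensure_structure inserts/appends);
-- Python B does not. The equivalence proved here is about the RETURN value only.

-- ===== PORT A =====
-- `current_section not in target_sections` (current_section may be None)
def pvTargetCur (cur : Option String) : Bool :=
  cur == some "# Day planner" || cur == some "# Journey"

-- A's ensure_structure: j_idx via next(enumerate…) with -1 default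
def pvFindJ : List String → Int → Int
  | [], _ => -1
  | l :: rest, i => if PySem.Str.strip l = "# Journey" then i else pvFindJ rest (i + 1)

def pvEnsureA (lines : List String) : List String :=
  let has_dp := lines.any (fun l => PySem.Str.strip l = "# Day planner")
  let j_idx := pvFindJ lines 0
  let lines1 :=
    if ¬ has_dp then
      if j_idx ≠ -1 then PySem.List.insert lines j_idx "# Day planner\n\n"
      else "# Day planner\n\n" :: (lines ++ ["\n# Journey\n"])
    else lines
  if has_dp ∧ j_idx = -1 then lines1 ++ ["\n# Journey\n"] else lines1

-- A's inner lookahead while-loop: returns (has_content, suffix starting at position j)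
def pvScanA : List String → Bool × List String
  | [] => (false, [])
  | l :: rest =>
    let s := PySem.Str.strip l
    if PySem.Str.startswith s "# " ∨ PySem.Str.startswith s "## " ∨ s = "----------" then
      (false, l :: rest)
    else if s ≠ "" then (true, l :: rest)
    else pvScanA rest

theorem pvScanA_length (ls : List String) : (pvScanA ls).2.length ≤ ls.length := by
  induction ls with
  | nil => simp [pvScanA]
  | cons l rest ih =>
    simp only [pvScanA]
    split_ifs <;> simp <;> omega

def pvLoopA : List String → Option String → Bool → List String → List String × Bool
  | [], _, modified, cleaned => (cleaned, modified)
  | line :: rest, cur, modified, cleaned =>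
    let s := PySem.Str.strip line
    if PySem.Str.startswith s "# " then
      pvLoopA rest (some s) modified (cleaned ++ [line])
    else if ¬ pvTargetCur cur then
      pvLoopA rest cur modified (cleaned ++ [line])
    else if PySem.Str.startswith s "## " then
      let hc := pvScanA rest
      if ¬ hc.1 then pvLoopA hc.2 cur true cleaned
      else pvLoopA rest cur modified (cleaned ++ [line])
    else
      pvLoopA rest cur modified (cleaned ++ [line])
termination_by ls _ _ _ => ls.length
decreasing_by
  all_goals (have := pvScanA_length rest; simp; try omega)

def cleanup_empty_headers (lines : List String) (date_tag : String) : List String × Bool :=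
  pvLoopA (pvEnsureA lines) none false []

-- ===== PORT B =====
-- B's non-mutating structure guarantee (slicing instead of insert)
def pvEnsureB (lines : List String) : List String :=
  if ¬ lines.any (fun l => PySem.Str.strip l = "# Day planner") then
    match lines.findIdx? (fun l => PySem.Str.strip l = "# Journey") with
    | none => ["# Day planner\n\n"] ++ lines ++ ["\n# Journey\n"]
    | some j => lines.take j ++ ["# Day planner\n\n"] ++ lines.drop j
  else if lines.all (fun l => ¬ PySem.Str.strip l = "# Journey") then
    lines ++ ["\n# Journey\n"]
  else lines

-- B's single flat pass: pending header slot + buffered blanks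
def pvLoopB : List String → Option String → Option String → List String → Bool →
    List String → List String × Bool
  | [], _, pending, _, modified, out =>
    (out, if pending.isSome then true else modified)
  | line :: rest, cur, pending, blanks, modified, out =>
    let s := PySem.Str.strip line
    if PySem.Str.startswith s "# " then
      pvLoopB rest (some s) none [] (if pending.isSome then true else modified) (out ++ [line])
    else if ¬ pvTargetCur cur then
      pvLoopB rest cur pending blanks modified (out ++ [line])
    else if PySem.Str.startswith s "## " then
      pvLoopB rest cur (some line) [] (if pending.isSome then true else modified) out
    else if s = "----------" then
      pvLoopB rest cur none [] (if pending.isSome then true else modified) (out ++ [line])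
    else if s = "" then
      match pending with
      | some _ => pvLoopB rest cur pending (blanks ++ [line]) modified out
      | none => pvLoopB rest cur pending blanks modified (out ++ [line])
    else
      match pending with
      | some h => pvLoopB rest cur none [] modified (out ++ [h] ++ blanks ++ [line])
      | none => pvLoopB rest cur none blanks modified (out ++ [line])

def cleanup_empty_headers_alt (lines : List String) (date_tag : String) : List String × Bool :=
  pvLoopB (pvEnsureB lines) none none [] false []

-- ===== PRECONDITION & SPEC =====
def Spec_cleanup_empty_headers (lines : List String) (date_tag : String) (out : List String × Bool) : Prop := out = cleanup_empty_headers_alt lines date_tag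
instance (lines : List String) (date_tag : String) (out : List String × Bool) : Decidable (Spec_cleanup_empty_headers lines date_tag out) := by unfold Spec_cleanup_empty_headers; infer_instance

-- ===== CLAIM (what is proved, stated in full; the proofs are below) =====
def Claim_equal_cleanup_empty_headers : Prop := ∀ (lines : List String) (date_tag : String), Dom_cleanup_empty_headers lines date_tag → Spec_cleanup_empty_headers lines date_tag (cleanup_empty_headers lines date_tag)

-- ===== LEMMAS AND PROOFS =====

theorem pvFindJ_eq (lines : List String) (i : Int) :
    pvFindJ lines i =
      match lines.findIdx? (fun l => PySem.Str.strip l = "# Journey") with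
      | none => -1
      | some j => i + j := by
  induction lines generalizing i with
  | nil => simp [pvFindJ]
  | cons l rest ih =>
    by_cases h : PySem.Str.strip l = "# Journey"
    · simp [pvFindJ, h, List.findIdx?_cons]
    · simp only [pvFindJ, if_neg h, ih, List.findIdx?_cons, h, decide_false,
        Bool.false_eq_true]
      cases hf : List.findIdx? (fun l => decide (PySem.Str.strip l = "# Journey")) rest
      · simp
      · simp only [Option.map_some]
        push_cast
        ring

theorem pvEnsure_eq (lines : List String) : pvEnsureB lines = pvEnsureA lines := by
  unfold pvEnsureA pvEnsureB
  rw [pvFindJ_eq lines 0]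
  by_cases hdp : lines.any (fun l => PySem.Str.strip l = "# Day planner")
  · -- has_dp: B's elif all ↔ A's j_idx = -1
    cases hf : lines.findIdx? (fun l => PySem.Str.strip l = "# Journey") with
    | none =>
      have hall : ∀ x ∈ lines, ¬ PySem.Str.strip x = "# Journey" := by
        intro x hx
        simpa using List.findIdx?_eq_none_iff.mp hf x hx
      simp [hdp]
      exact hall
    | some j =>
      have hj0 : ¬ ((0 : Int) + (j : Int) = -1) := by omega
      obtain ⟨hj, hget⟩ := List.findIdx?_eq_some_iff_getElem.mp hf
      have hmem : ∃ x ∈ lines, PySem.Str.strip x = "# Journey" := by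
        refine ⟨lines[j], List.getElem_mem hj, ?_⟩
        simpa using hget.1
      simp [hdp, hmem]
  · cases hf : lines.findIdx? (fun l => PySem.Str.strip l = "# Journey") with
    | none => simp [hdp]
    | some j =>
      have hj0 : ((0 : Int) + (j : Int) ≠ -1) := by omega
      have hjlt : j < lines.length := (List.findIdx?_eq_some_iff_getElem.mp hf).1
      have hins : PySem.List.insert lines ((j : Int)) "# Day planner\n\n" =
          lines.take j ++ "# Day planner\n\n" :: lines.drop j := by
        simpa using PySem.List.insert_natCast lines j "# Day planner\n\n" (le_of_lt hjlt)
      simp [hdp, hins]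

theorem pvLoop_eq (n : Nat) : ∀ rest : List String, rest.length ≤ n →
    (∀ cur m out, pvLoopB rest cur none [] m out = pvLoopA rest cur m out) ∧
    (∀ cur h bs m out, pvTargetCur cur = true →
      pvLoopB rest cur (some h) bs m out =
        if (pvScanA rest).1 then pvLoopA rest cur m (out ++ h :: bs)
        else pvLoopA (pvScanA rest).2 cur true out) := by
  induction n with
  | zero =>
    intro rest hlen
    have : rest = [] := List.length_eq_zero_iff.mp (Nat.le_zero.mp hlen)
    subst this
    refine ⟨fun cur m out => ?_, fun cur h bs m out _ => ?_⟩
    · simp [pvLoopA, pvLoopB]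
    · simp [pvLoopA, pvLoopB, pvScanA]
  | succ n ih =>
    intro rest hlen
    cases rest with
    | nil =>
      refine ⟨fun cur m out => ?_, fun cur h bs m out _ => ?_⟩
      · simp [pvLoopA, pvLoopB]
      · simp [pvLoopA, pvLoopB, pvScanA]
    | cons line rest' =>
      have hlen' : rest'.length ≤ n := by simp at hlen; omega
      obtain ⟨ihQ, ihP⟩ := ih rest' hlen'
      constructor
      · -- Q: no pending header; both sides treat the line alike
        intro cur m out
        by_cases c1 : PySem.Str.startswith (PySem.Str.strip line) "# " = true
        · simp only [pvLoopA, pvLoopB]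
          rw [if_pos c1, if_pos c1, ihQ]
          simp
        · by_cases c2 : pvTargetCur cur = true
          · by_cases c3 : PySem.Str.startswith (PySem.Str.strip line) "## " = true
            · -- '## ' header: B goes pending, A runs its lookahead
              simp only [pvLoopA, pvLoopB]
              rw [if_neg c1, if_neg c1, if_neg (not_not_intro c2), if_neg (not_not_intro c2),
                if_pos c3, if_pos c3]
              simp only [Option.isSome_none, Bool.false_eq_true, if_false]
              rw [ihP cur line [] m out c2]
              by_cases hc : (pvScanA rest').1 = true
              · rw [if_pos hc, if_neg (not_not_intro hc)]
              · rw [if_neg hc, if_pos hc]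
            · by_cases c4 : PySem.Str.strip line = "----------"
              · simp only [pvLoopA, pvLoopB]
                rw [if_neg c1, if_neg c1, if_neg (not_not_intro c2), if_neg (not_not_intro c2),
                  if_neg c3, if_neg c3, if_pos c4, ihQ]
                simp
              · by_cases c5 : PySem.Str.strip line = ""
                · simp only [pvLoopA, pvLoopB]
                  rw [if_neg c1, if_neg c1, if_neg (not_not_intro c2), if_neg (not_not_intro c2),
                    if_neg c3, if_neg c3, if_neg c4, if_pos c5, ihQ]
                · simp only [pvLoopA, pvLoopB]
                  rw [if_neg c1, if_neg c1, if_neg (not_not_intro c2), if_neg (not_not_intro c2),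
                    if_neg c3, if_neg c3, if_neg c4, if_neg c5, ihQ]
          · simp only [pvLoopA, pvLoopB]
            rw [if_neg c1, if_neg c1, if_pos c2, if_pos c2, ihQ]
      · -- P: a header is pending in B; A is mid-lookahead
        intro cur h bs m out hcur
        by_cases c1 : PySem.Str.startswith (PySem.Str.strip line) "# " = true
        · -- section boundary: discard pending, modified := true
          have hscan : pvScanA (line :: rest') = (false, line :: rest') := by
            simp only [pvScanA]
            rw [if_pos (Or.inl c1)]
          rw [hscan]
          simp only [Bool.false_eq_true, if_false]
          simp only [pvLoopB]
          rw [if_pos c1, ihQ]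
          conv_rhs => rw [pvLoopA]
          rw [if_pos c1]
          simp
        · by_cases c3 : PySem.Str.startswith (PySem.Str.strip line) "## " = true
          · -- next '## ' header: replace pending, modified := true
            have hscan : pvScanA (line :: rest') = (false, line :: rest') := by
              simp only [pvScanA]
              rw [if_pos (Or.inr (Or.inl c3))]
            rw [hscan]
            simp only [Bool.false_eq_true, if_false]
            simp only [pvLoopB]
            rw [if_neg c1, if_neg (not_not_intro hcur), if_pos c3]
            simp only [Option.isSome_some, if_pos]
            rw [ihP cur line [] true out hcur]
            conv_rhs => rw [pvLoopA]
            rw [if_neg c1, if_neg (not_not_intro hcur), if_pos c3]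
            by_cases hc : (pvScanA rest').1 = true
            · rw [if_pos hc, if_neg (not_not_intro hc)]
            · rw [if_neg hc, if_pos hc]
          · by_cases c4 : PySem.Str.strip line = "----------"
            · -- separator boundary: discard pending, modified := true, emit line
              have hscan : pvScanA (line :: rest') = (false, line :: rest') := by
                simp only [pvScanA]
                rw [if_pos (Or.inr (Or.inr c4))]
              rw [hscan]
              simp only [Bool.false_eq_true, if_false]
              simp only [pvLoopB]
              rw [if_neg c1, if_neg (not_not_intro hcur), if_neg c3, if_pos c4]
              simp only [Option.isSome_some, if_pos]
              rw [ihQ]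
              conv_rhs => rw [pvLoopA]
              rw [if_neg c1, if_neg (not_not_intro hcur), if_neg c3]
            · have hor : ¬ (PySem.Str.startswith (PySem.Str.strip line) "# " = true ∨
                  PySem.Str.startswith (PySem.Str.strip line) "## " = true ∨
                  PySem.Str.strip line = "----------") :=
                fun hh => hh.elim c1 (fun hh' => hh'.elim c3 c4)
              by_cases c5 : PySem.Str.strip line = ""
              · -- blank while pending: buffer it
                have hscan : pvScanA (line :: rest') = pvScanA rest' := by
                  simp only [pvScanA]
                  rw [if_neg hor, if_neg (not_not_intro c5)]
                rw [hscan]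
                simp only [pvLoopB]
                rw [if_neg c1, if_neg (not_not_intro hcur), if_neg c3, if_neg c4, if_pos c5]
                rw [ihP cur h (bs ++ [line]) m out hcur]
                by_cases hc : (pvScanA rest').1 = true
                · rw [if_pos hc, if_pos hc]
                  conv_rhs => rw [pvLoopA]
                  rw [if_neg c1, if_neg (not_not_intro hcur), if_neg c3]
                  simp
                · rw [if_neg hc, if_neg hc]
              · -- content while pending: flush header, blanks, then the line
                have hscan : pvScanA (line :: rest') = (true, line :: rest') := by
                  simp only [pvScanA]
                  rw [if_neg hor, if_pos c5]
                have h1 : (pvScanA (line :: rest')).1 = true := by rw [hscan]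
                rw [if_pos h1]
                simp only [pvLoopB]
                rw [if_neg c1, if_neg (not_not_intro hcur), if_neg c3, if_neg c4, if_neg c5, ihQ]
                conv_rhs => rw [pvLoopA]
                rw [if_neg c1, if_neg (not_not_intro hcur), if_neg c3]
                simp

-- ===== VERDICT (by name: the statement is the Claim_ definition above) =====
theorem cleanup_empty_headers_spec : Claim_equal_cleanup_empty_headers := by
  intro lines date_tag _
  unfold Spec_cleanup_empty_headers cleanup_empty_headers cleanup_empty_headers_alt
  rw [pvEnsure_eq]
  exact ((pvLoop_eq (pvEnsureA lines).length (pvEnsureA lines) le_rfl).1 none false []).symm
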